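-- pv_equiv track=rewrite | github.com/LukasPatrnciak/2SAT-Solver | 2sat_solver.py | find_incremental_conflict_cycle
-- ===== SOURCE A (Python) =====
-- from collections import deque
--
-- def literal_to_graph_index(x):
--     variable = abs(x) - 1
--
--     if x > 0:
--         return 2 * variable
--
--     else:
--         return 2 * variable + 1
--
-- def graph_index_to_literal(index):
--     variable = index // 2 + 1
--
--     if index % 2 == 0:
--         return variable
--
--     else:
--         return -variable
--
-- def find_path(graph, start, end):
--     parent = [-1] * len(graph)
--     queue = deque()
--
--     queue.append(start)
--     parent[start] = start
--
--     while queue: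
--         current = queue.popleft() # .pop(0)
--
--         if current == end:
--             break
--
--         for neighbor in graph[current]:
--             if parent[neighbor] == -1:
--                 parent[neighbor] = current
--                 queue.append(neighbor)
--
--     if parent[end] == -1:
--         return []
--
--     path = []
--     current = end
--
--     while current != start:
--         path.append(current)
--         current = parent[current]
--
--     path.append(start)
--     path.reverse()
--
--     literals_path = []
--
--     for vertex in path:
--         literals_path.append(graph_index_to_literal(vertex))
--
--     return literals_path
--
-- def find_incremental_conflict_cycle(graph, variables_to_check):
--     for variable in variables_to_check:
--         positive = literal_to_graph_index(variable)
--         negative = literal_to_graph_index(-variable)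
--
--         path1 = find_path(graph, positive, negative)
--         path2 = find_path(graph, negative, positive)
--
--         if path1 and path2:
--             return path1 + path2[1:]
--
--     return []
-- ===== SOURCE B (Python) =====
-- from collections import deque
--
-- def literal_to_graph_index(x):
--     variable = abs(x) - 1
--     if x > 0:
--         return 2 * variable
--     else:
--         return 2 * variable + 1
--
-- def graph_index_to_literal(index):
--     variable = index // 2 + 1
--     if index % 2 == 0:
--         return variable
--     else:
--         return -variable
--
-- def find_path(graph, start, end):
--     # BFS that carries the path itself in the queue and tests the goal when a
--     # neighbor is generated: no parent array, no backward reconstruction, and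
--     # it stops as soon as the endpoint is discovered.
--     visited = [False] * len(graph)
--     visited[start] = True
--     queue = deque()
--     queue.append((start, [start]))
--     while queue:
--         current, path = queue.popleft()
--         for neighbor in graph[current]:
--             if neighbor == end:
--                 return [graph_index_to_literal(v) for v in path + [end]]
--             if not visited[neighbor]:
--                 visited[neighbor] = True
--                 queue.append((neighbor, path + [neighbor]))
--     return []
--
-- def find_incremental_conflict_cycle(graph, variables_to_check):
--     for variable in variables_to_check:
--         positive = literal_to_graph_index(variable)
--         negative = literal_to_graph_index(-variable)
--         path1 = find_path(graph, positive, negative)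
--         path2 = find_path(graph, negative, positive)
--         if path1 and path2:
--             return path1 + path2[1:]
--     return []
-- ===== Notes on version B (the rewrite author's own statement) =====
-- stated objective: simpler
-- what changed: find_path's parent-array BFS with backward path reconstruction is replaced by a BFS whose queue carries (node, path-so-far) pairs and which tests the goal when a neighbor is generated, so the parent array, the post-loop parent[end] check and the reconstruction-and-reverse loop disappear; the outer per-variable loop is unchanged.
-- outside the precondition, e.g. on find_incremental_conflict_cycle([[-1], [0]], [1]): A returns [1, -1, 1], B returns []; on find_incremental_conflict_cycle([[5]], [0]): A returns [], B raises IndexError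
import Mathlib
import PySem

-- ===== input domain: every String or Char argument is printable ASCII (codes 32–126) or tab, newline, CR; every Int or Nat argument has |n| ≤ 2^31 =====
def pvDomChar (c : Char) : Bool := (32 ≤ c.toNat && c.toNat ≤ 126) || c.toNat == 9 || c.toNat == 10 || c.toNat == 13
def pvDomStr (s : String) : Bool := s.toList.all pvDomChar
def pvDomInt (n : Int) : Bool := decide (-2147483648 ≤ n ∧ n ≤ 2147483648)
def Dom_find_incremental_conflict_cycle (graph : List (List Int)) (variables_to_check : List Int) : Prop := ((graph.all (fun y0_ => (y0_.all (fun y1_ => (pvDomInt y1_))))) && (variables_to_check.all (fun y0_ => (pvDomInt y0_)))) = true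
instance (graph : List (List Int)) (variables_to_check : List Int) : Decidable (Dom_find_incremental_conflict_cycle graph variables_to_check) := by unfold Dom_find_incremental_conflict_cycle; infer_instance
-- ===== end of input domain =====

-- B replaces A's parent-array BFS + backward path reconstruction by a BFS whose queue
-- carries the path itself and that tests the goal when a neighbor is generated
-- (simpler: no parent array, no reconstruction loop); return values only.

-- ===== PORT A =====
def literalToGraphIndex (x : Int) : Int :=
  let variable_ := |x| - 1
  if x > 0 then 2 * variable_ else 2 * variable_ + 1

def graphIndexToLiteral (index : Int) : Int :=
  let variable_ := PySem.Int.floordiv index 2 + 1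
  if PySem.Int.mod index 2 = 0 then variable_ else -variable_

-- the 'while queue:' loop of A's find_path; fuel only makes the recursion structural
-- (each iteration pops one element and every enqueue clears one -1 parent cell, so
-- graph.length + 1 iterations always suffice on inputs admitted by Pre_).
-- pyGetD/pySetD are exact for the in-range indices guaranteed by Pre_.
def bfsLoopA (graph : List (List Int)) (endIdx : Int) :
    Nat → List Int → List Int → List Int
  | 0, _, parent => parent
  | fuel+1, queue, parent =>
    match queue with
    | [] => parent
    | current :: rest =>
      if current = endIdx then parent
      else
        let st := (PySem.List.pyGetD graph current []).foldl
          (fun (st : List Int × List Int) neighbor =>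
            if PySem.List.pyGetD st.2 neighbor 0 = -1 then
              (st.1 ++ [neighbor], PySem.List.pySetD st.2 neighbor current)
            else st) (rest, parent)
        bfsLoopA graph endIdx fuel st.1 st.2

-- A's 'while current != start: path.append(current); current = parent[current]' plus the
-- final append of start and the reversal (fuel for structural recursion, as above).
def reconA (parent : List Int) (start : Int) : Nat → Int → List Int → List Int
  | 0, _, _ => []
  | fuel+1, current, path =>
    if current ≠ start then
      reconA parent start fuel (PySem.List.pyGetD parent current 0) (path ++ [current])
    else (path ++ [start]).reverse

def findPathA (graph : List (List Int)) (start endIdx : Int) : List Int :=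
  let parent0 := PySem.List.pySetD (List.replicate graph.length (-1 : Int)) start start
  let parent := bfsLoopA graph endIdx (graph.length + 1) [start] parent0
  if PySem.List.pyGetD parent endIdx 0 = -1 then []
  else (reconA parent start (graph.length + 1) endIdx []).map graphIndexToLiteral

def find_incremental_conflict_cycle (graph : List (List Int)) (variables_to_check : List Int) : List Int :=
  match variables_to_check with
  | [] => []
  | variable_ :: rest =>
    let positive := literalToGraphIndex variable_
    let negative := literalToGraphIndex (-variable_)
    let path1 := findPathA graph positive negative
    let path2 := findPathA graph negative positive
    if path1 ≠ [] ∧ path2 ≠ [] then path1 ++ PySem.List.slice path2 (some 1) none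
    else find_incremental_conflict_cycle graph rest

-- ===== PORT B =====
-- B's inner 'for neighbor in graph[current]:' loop: returns none when it hits the goal
-- (Python's early 'return'), otherwise the updated queue and visited flags.
def scanB (endIdx : Int) (path : List Int) :
    List Int → List (Int × List Int) → List Bool → Option (List (Int × List Int) × List Bool)
  | [], queue, visited => some (queue, visited)
  | n :: ns, queue, visited =>
    if n = endIdx then none
    else if PySem.List.pyGetD visited n true = false then
      scanB endIdx path ns (queue ++ [(n, path ++ [n])]) (PySem.List.pySetD visited n true)
    else scanB endIdx path ns queue visited

-- B's 'while queue:' loop: queue of (node, path-so-far) pairs, visited set at enqueue time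
def bfsLoopB (graph : List (List Int)) (endIdx : Int) :
    Nat → List (Int × List Int) → List Bool → List Int
  | 0, _, _ => []
  | fuel+1, queue, visited =>
    match queue with
    | [] => []
    | (current, path) :: rest =>
      match scanB endIdx path (PySem.List.pyGetD graph current []) rest visited with
      | none => (path ++ [endIdx]).map graphIndexToLiteral
      | some (q', vis') => bfsLoopB graph endIdx fuel q' vis'

def findPathB (graph : List (List Int)) (start endIdx : Int) : List Int :=
  let visited0 := PySem.List.pySetD (List.replicate graph.length false) start true
  bfsLoopB graph endIdx (graph.length + 1) [(start, [start])] visited0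

def find_incremental_conflict_cycle_alt (graph : List (List Int)) (variables_to_check : List Int) : List Int :=
  match variables_to_check with
  | [] => []
  | variable_ :: rest =>
    let positive := literalToGraphIndex variable_
    let negative := literalToGraphIndex (-variable_)
    let path1 := findPathB graph positive negative
    let path2 := findPathB graph negative positive
    if path1 ≠ [] ∧ path2 ≠ [] then path1 ++ PySem.List.slice path2 (some 1) none
    else find_incremental_conflict_cycle_alt graph rest

-- ===== PRECONDITION & SPEC =====
-- Pre_ restricts to the function's natural domain, well-formed 2-SAT implication graphs:
-- every neighbor index in [0, len(graph)) (only needed when some variable is checked) and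
-- every checked variable either 0 (with a nonempty graph) or with both literal nodes present
-- (1 ≤ |v| and 2*|v| ≤ len(graph)); outside it A either raises IndexError or returns a
-- value produced by Python negative-index wraparound aliasing of its parent array.
def Pre_find_incremental_conflict_cycle (graph : List (List Int)) (variables_to_check : List Int) : Prop :=
  (∀ v ∈ variables_to_check,
      (v = 0 ∧ 1 ≤ (graph.length : Int)) ∨ (1 ≤ |v| ∧ 2 * |v| ≤ (graph.length : Int))) ∧
  (variables_to_check = [] ∨ ∀ row ∈ graph, ∀ n ∈ row, 0 ≤ n ∧ n < (graph.length : Int))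
instance (graph : List (List Int)) (variables_to_check : List Int) : Decidable (Pre_find_incremental_conflict_cycle graph variables_to_check) := by unfold Pre_find_incremental_conflict_cycle; infer_instance

def pvWitness_find_incremental_conflict_cycle : List (List Int) × List Int := ([[1], [0]], [1])

def Spec_find_incremental_conflict_cycle (graph : List (List Int)) (variables_to_check : List Int) (out : List Int) : Prop := out = find_incremental_conflict_cycle_alt graph variables_to_check
instance (graph : List (List Int)) (variables_to_check : List Int) (out : List Int) : Decidable (Spec_find_incremental_conflict_cycle graph variables_to_check out) := by unfold Spec_find_incremental_conflict_cycle; infer_instance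

-- ===== CLAIM (what is proved, stated in full; the proofs are below) =====
def Claim_equal_find_incremental_conflict_cycle : Prop := ∀ (graph : List (List Int)) (variables_to_check : List Int), Dom_find_incremental_conflict_cycle graph variables_to_check → Pre_find_incremental_conflict_cycle graph variables_to_check → Spec_find_incremental_conflict_cycle graph variables_to_check (find_incremental_conflict_cycle graph variables_to_check)

-- ===== LEMMAS AND PROOFS =====

-- the parent-pointer chain from `cur` back to `start`, read forward: the path A's
-- reconstruction produces.  `none` = the chain is broken (never happens for queued nodes).
def rebuild? (parent : List Int) (start : Int) : Nat → Int → Option (List Int)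
  | 0, _ => none
  | fuel+1, cur =>
    if cur = start then some [start]
    else
      let p := PySem.List.pyGetD parent cur 0
      if p = -1 then none
      else (rebuild? parent start fuel p).map (· ++ [cur])

def cntNeg (parent : List Int) : Nat := parent.countP (fun x => decide (x = -1))

def countFalse (visited : List Bool) : Nat := visited.countP (fun b => decide (b = false))

-- parent' preserves every already-set parent cell
def Keeps (parent parent' : List Int) : Prop :=
  ∀ c : Int, PySem.List.pyGetD parent c 0 ≠ -1 →
    PySem.List.pyGetD parent' c 0 = PySem.List.pyGetD parent c 0

-- the loop invariant tying A's (queue of nodes, parent array) to B's (queue of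
-- (node, path) pairs, visited flags) while the endpoint is still undiscovered
def BfsInv (graph : List (List Int)) (start endIdx : Int) (qB : List (Int × List Int))
    (parent : List Int) (visited : List Bool) : Prop :=
  parent.length = graph.length ∧ visited.length = graph.length ∧
  (∀ i : Int, 0 ≤ i → i < (graph.length : Int) →
      (PySem.List.pyGetD visited i true = true ↔ PySem.List.pyGetD parent i 0 ≠ -1)) ∧
  (∀ pr ∈ qB, 0 ≤ pr.1 ∧ pr.1 < (graph.length : Int) ∧ pr.1 ≠ endIdx) ∧
  (∀ pr ∈ qB, ∃ g, g + cntNeg parent ≤ graph.length ∧ rebuild? parent start g pr.1 = some pr.2) ∧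
  PySem.List.pyGetD parent start 0 = start ∧
  PySem.List.pyGetD parent endIdx 0 = -1

lemma pyGetD_pySetD_nonneg {α : Type} (xs : List α) (n m : Int) (v : α) (d : α)
    (h0 : 0 ≤ n) (h1 : n < (xs.length : Int)) (hm : 0 ≤ m) :
    PySem.List.pyGetD (PySem.List.pySetD xs n v) m d = if m = n then v else PySem.List.pyGetD xs m d := by
  have hmn : m = ((m.toNat : Nat) : Int) := by omega
  rw [PySem.List.pySetD_of_nonneg xs v h0, hmn, PySem.List.pyGetD_natCast, PySem.List.pyGetD_natCast]
  rw [List.getD, List.getD, List.getElem?_set]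
  by_cases he : n.toNat = m.toNat
  · rw [if_pos he, if_pos (by omega), if_pos (show ((m.toNat : Nat) : Int) = n by omega)]
    simp
  · rw [if_neg he, if_neg (show ¬ ((m.toNat : Nat) : Int) = n by omega)]

lemma pyIdx?_lt (n : Nat) (i : Int) (k : Nat) (h : PySem.List.pyIdx? n i = some k) : k < n := by
  unfold PySem.List.pyIdx? at h
  split_ifs at h <;> simp at h <;> omega

lemma pyGetD_set_keep (xs : List Int) (n : Int) (v : Int)
    (hold : PySem.List.pyGetD xs n 0 = -1) :
    Keeps xs (PySem.List.pySetD xs n v) := by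
  intro c hc
  unfold PySem.List.pySetD PySem.List.pySet?
  cases hidx : PySem.List.pyIdx? xs.length n with
  | none => simp
  | some k =>
    have hk : k < xs.length := pyIdx?_lt _ _ _ hidx
    have hxk : xs[k] = -1 := by
      unfold PySem.List.pyGetD PySem.List.pyGet? at hold
      rw [hidx] at hold
      simpa [List.getElem?_eq_getElem hk] using hold
    simp only [Option.map_some, Option.getD_some]
    unfold PySem.List.pyGetD PySem.List.pyGet? at hc ⊢
    rw [List.length_set]
    cases hic : PySem.List.pyIdx? xs.length c with
    | none => rfl
    | some j =>
      have hj : j < xs.length := pyIdx?_lt _ _ _ hic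
      rw [hic] at hc
      simp only [Option.bind_some] at hc ⊢
      rw [List.getElem?_set]
      by_cases hkj : k = j
      · exfalso
        apply hc
        rw [List.getElem?_eq_getElem hj]
        simp [← hkj, hxk]
      · rw [if_neg hkj]

lemma keeps_refl (parent : List Int) : Keeps parent parent := fun _ _ => rfl

lemma keeps_trans {p q r : List Int} (h1 : Keeps p q) (h2 : Keeps q r) : Keeps p r := by
  intro c hc
  have e1 := h1 c hc
  have e2 := h2 c (by rw [e1]; exact hc)
  rw [e2, e1]

lemma rebuild?_mono (parent parent' : List Int) (start : Int) (h : Keeps parent parent') :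
    ∀ g cur p, rebuild? parent start g cur = some p → rebuild? parent' start g cur = some p := by
  intro g
  induction g with
  | zero => intro cur p hc; simp [rebuild?] at hc
  | succ g ih =>
    intro cur p hc
    by_cases hcs : cur = start
    · simp [rebuild?, hcs] at hc ⊢; exact hc
    · simp only [rebuild?, if_neg hcs] at hc ⊢
      by_cases hneg : PySem.List.pyGetD parent cur 0 = -1
      · simp [hneg] at hc
      · rw [h cur hneg]
        simp only [if_neg hneg] at hc ⊢
        obtain ⟨p', hp', rfl⟩ := Option.map_eq_some_iff.mp hc
        exact Option.map_eq_some_iff.mpr ⟨p', ih _ _ hp', rfl⟩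

lemma recon_of_rebuild (parent : List Int) (start : Int) :
    ∀ g cur p, rebuild? parent start g cur = some p →
    ∀ f, g ≤ f → ∀ acc, reconA parent start f cur acc = p ++ acc.reverse := by
  intro g
  induction g with
  | zero => intro cur p hc; simp [rebuild?] at hc
  | succ g ih =>
    intro cur p hc f hf acc
    obtain ⟨f', rfl⟩ : ∃ f', f = f' + 1 := ⟨f - 1, by omega⟩
    by_cases hcs : cur = start
    · simp [rebuild?, hcs] at hc
      simp [reconA, hcs, ← hc]
    · simp only [rebuild?, if_neg hcs] at hc
      by_cases hneg : PySem.List.pyGetD parent cur 0 = -1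
      · simp [hneg] at hc
      · simp only [if_neg hneg] at hc
        obtain ⟨p', hp', rfl⟩ := Option.map_eq_some_iff.mp hc
        rw [reconA, if_pos hcs, ih _ _ hp' f' (by omega)]
        simp

lemma cntNeg_set (parent : List Int) (n : Int) (v : Int)
    (h0 : 0 ≤ n) (h1 : n < (parent.length : Int))
    (hold : PySem.List.pyGetD parent n 0 = -1) (hv : v ≠ -1) :
    cntNeg (PySem.List.pySetD parent n v) + 1 = cntNeg parent := by
  have hn : n.toNat < parent.length := by omega
  have hget : parent[n.toNat] = -1 := by
    rw [PySem.List.pyGetD_eq_getElem parent 0 h0 h1] at hold; exact hold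
  rw [PySem.List.pySetD_of_nonneg parent v h0]
  unfold cntNeg
  rw [List.countP_set hn]
  have hpos : 0 < parent.countP (fun x => decide (x = -1)) := by
    rw [List.countP_pos_iff]
    exact ⟨parent[n.toNat], List.getElem_mem hn, by simp [hget]⟩
  simp [hget, hv]
  omega

lemma cntFalse_set (visited : List Bool) (n : Int)
    (h0 : 0 ≤ n) (h1 : n < (visited.length : Int))
    (hold : PySem.List.pyGetD visited n true = false) :
    countFalse (PySem.List.pySetD visited n true) + 1 = countFalse visited := by
  have hn : n.toNat < visited.length := by omega
  have hget : visited[n.toNat] = false := by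
    rw [PySem.List.pyGetD_eq_getElem visited true h0 h1] at hold; exact hold
  rw [PySem.List.pySetD_of_nonneg visited true h0]
  unfold countFalse
  rw [List.countP_set hn]
  have hpos : 0 < visited.countP (fun b => decide (b = false)) := by
    rw [List.countP_pos_iff]
    exact ⟨visited[n.toNat], List.getElem_mem hn, by simp [hget]⟩
  rw [if_pos (by simp [hget]), if_neg (by simp)]
  omega

-- one-step unfolding equations for the loops (definitional)
lemma bfsLoopA_zero (g : List (List Int)) (e : Int) (q : List Int) (p : List Int) :
    bfsLoopA g e 0 q p = p := rfl
lemma bfsLoopB_zero (g : List (List Int)) (e : Int) (q : List (Int × List Int)) (v : List Bool) :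
    bfsLoopB g e 0 q v = [] := rfl
lemma bfsLoopA_nil (g : List (List Int)) (e : Int) (f : Nat) (p : List Int) :
    bfsLoopA g e (f+1) [] p = p := rfl
lemma bfsLoopB_nil (g : List (List Int)) (e : Int) (f : Nat) (v : List Bool) :
    bfsLoopB g e (f+1) [] v = [] := rfl
lemma bfsLoopA_cons (g : List (List Int)) (e : Int) (f : Nat) (c : Int) (q : List Int) (p : List Int) :
    bfsLoopA g e (f+1) (c :: q) p =
      if c = e then p else
        bfsLoopA g e f
          ((PySem.List.pyGetD g c []).foldl
            (fun (st : List Int × List Int) neighbor =>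
              if PySem.List.pyGetD st.2 neighbor 0 = -1 then
                (st.1 ++ [neighbor], PySem.List.pySetD st.2 neighbor c)
              else st) (q, p)).1
          ((PySem.List.pyGetD g c []).foldl
            (fun (st : List Int × List Int) neighbor =>
              if PySem.List.pyGetD st.2 neighbor 0 = -1 then
                (st.1 ++ [neighbor], PySem.List.pySetD st.2 neighbor c)
              else st) (q, p)).2 := rfl
lemma bfsLoopB_cons (g : List (List Int)) (e : Int) (f : Nat) (c : Int) (pa : List Int)
    (q : List (Int × List Int)) (v : List Bool) :
    bfsLoopB g e (f+1) ((c, pa) :: q) v =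
      match scanB e pa (PySem.List.pyGetD g c []) q v with
      | none => (pa ++ [e]).map graphIndexToLiteral
      | some (q', vis') => bfsLoopB g e f q' vis' := rfl
lemma scanB_cons (e : Int) (pa : List Int) (n : Int) (ns : List Int)
    (q : List (Int × List Int)) (v : List Bool) :
    scanB e pa (n :: ns) q v =
      if n = e then none
      else if PySem.List.pyGetD v n true = false then
        scanB e pa ns (q ++ [(n, pa ++ [n])]) (PySem.List.pySetD v n true)
      else scanB e pa ns q v := rfl

-- every fold step of A's loop only fills -1 cells, so set cells survive the whole loop
lemma foldA_keeps (current : Int) :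
    ∀ (ns : List Int) (q : List Int) (parent : List Int),
    Keeps parent (ns.foldl (fun (st : List Int × List Int) neighbor =>
        if PySem.List.pyGetD st.2 neighbor 0 = -1 then
          (st.1 ++ [neighbor], PySem.List.pySetD st.2 neighbor current)
        else st) (q, parent)).2 := by
  intro ns
  induction ns with
  | nil => intro q parent; exact keeps_refl parent
  | cons n ns ih =>
    intro q parent
    simp only [List.foldl_cons]
    by_cases hb : PySem.List.pyGetD parent n 0 = -1
    · rw [if_pos hb]
      exact keeps_trans (pyGetD_set_keep parent n current hb) (ih _ _)
    · rw [if_neg hb]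
      exact ih _ _

lemma bfsLoopA_keeps (graph : List (List Int)) (endIdx : Int) :
    ∀ (fuel : Nat) (qA : List Int) (parent : List Int),
    Keeps parent (bfsLoopA graph endIdx fuel qA parent) := by
  intro fuel
  induction fuel with
  | zero => intro qA parent; exact keeps_refl parent
  | succ fuel ih =>
    intro qA parent
    match qA with
    | [] => exact keeps_refl parent
    | c :: q =>
      rw [bfsLoopA_cons]
      by_cases hc : c = endIdx
      · rw [if_pos hc]; exact keeps_refl parent
      · rw [if_neg hc]
        exact keeps_trans (foldA_keeps c _ q parent) (ih _ _)

-- one pass over a neighbor row: either both sides discover the endpoint (B returns,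
-- A has recorded the same path in its parent array), or they stay in lockstep
lemma scan_equiv (graph : List (List Int)) (start endIdx current : Int) (path : List Int)
    (hc0 : 0 ≤ current) (hst0 : 0 ≤ start) (hend0 : 0 ≤ endIdx)
    (hse : endIdx ≠ start) :
    ∀ (ns : List Int), (∀ n ∈ ns, 0 ≤ n ∧ n < (graph.length : Int)) →
    ∀ (rest : List (Int × List Int)) (parent : List Int) (visited : List Bool) (gcur : Nat),
    BfsInv graph start endIdx rest parent visited →
    gcur + cntNeg parent ≤ graph.length →
    rebuild? parent start gcur current = some path →
    (let sA := ns.foldl (fun (st : List Int × List Int) neighbor =>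
        if PySem.List.pyGetD st.2 neighbor 0 = -1 then
          (st.1 ++ [neighbor], PySem.List.pySetD st.2 neighbor current)
        else st) (rest.map Prod.fst, parent)
     match scanB endIdx path ns rest visited with
     | none =>
         rebuild? sA.2 start (gcur + 1) endIdx = some (path ++ [endIdx]) ∧
         PySem.List.pyGetD sA.2 endIdx 0 ≠ -1 ∧ gcur + 1 ≤ graph.length + 1
     | some (q', vis') =>
         sA.1 = q'.map Prod.fst ∧ BfsInv graph start endIdx q' sA.2 vis' ∧
         q'.length + cntNeg sA.2 ≤ rest.length + cntNeg parent) := by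
  intro ns
  induction ns with
  | nil =>
    intro _ rest parent visited gcur hInv hg hreb
    exact ⟨rfl, hInv, le_refl _⟩
  | cons n ns ih =>
    intro hns rest parent visited gcur hInv hg hreb
    obtain ⟨hn0, hn1⟩ := hns n (List.mem_cons_self)
    obtain ⟨hplen, hvlen, hvis, hrange, hpaths, hstart, hendneg⟩ := hInv
    have hn1p : n < (parent.length : Int) := by rw [hplen]; exact hn1
    have hn1v : n < (visited.length : Int) := by rw [hvlen]; exact hn1
    simp only [List.foldl_cons, scanB_cons]
    by_cases hne : n = endIdx
    · subst hne
      rw [if_pos rfl, if_pos hendneg]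
      have hkeep1 := pyGetD_set_keep parent n current hendneg
      have hget1 : PySem.List.pyGetD (PySem.List.pySetD parent n current) n 0 = current := by
        rw [pyGetD_pySetD_nonneg parent n n current 0 hn0 hn1p hn0, if_pos rfl]
      have hrebuild1 : rebuild? (PySem.List.pySetD parent n current) start (gcur + 1) n
          = some (path ++ [n]) := by
        simp only [rebuild?, if_neg hse, hget1]
        rw [if_neg (by omega : ¬ current = -1),
          rebuild?_mono parent _ start hkeep1 gcur current path hreb]
        rfl
      have hkeepF := foldA_keeps current ns (rest.map Prod.fst ++ [n]) (PySem.List.pySetD parent n current)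
      refine ⟨rebuild?_mono _ _ start hkeepF (gcur + 1) n _ hrebuild1, ?_, by omega⟩
      rw [hkeepF n (by rw [hget1]; omega), hget1]
      omega
    · rw [if_neg hne]
      have hcond : PySem.List.pyGetD parent n 0 = -1 ↔ PySem.List.pyGetD visited n true = false := by
        have := hvis n hn0 hn1
        constructor
        · intro hp
          cases hvb : PySem.List.pyGetD visited n true
          · rfl
          · exact absurd hp (by simpa [hvb] using this.mp hvb)
        · intro hv
          by_contra hp
          have := this.mpr hp
          rw [hv] at this
          exact Bool.false_ne_true this
      by_cases hb : PySem.List.pyGetD parent n 0 = -1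
      · rw [if_pos hb, if_pos (hcond.mp hb)]
        have hnstart : n ≠ start := by
          intro he
          rw [he, hstart] at hb
          omega
        have hkeep := pyGetD_set_keep parent n current hb
        have hcnt : cntNeg (PySem.List.pySetD parent n current) + 1 = cntNeg parent :=
          cntNeg_set parent n current hn0 hn1p hb (by omega)
        have hrebuild' : rebuild? (PySem.List.pySetD parent n current) start gcur current = some path :=
          rebuild?_mono parent _ start hkeep gcur current path hreb
        have happly := ih (fun m hm => hns m (List.mem_cons_of_mem _ hm))
          (rest ++ [(n, path ++ [n])]) (PySem.List.pySetD parent n current)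
          (PySem.List.pySetD visited n true) gcur ?_ (by omega) hrebuild'
        · have hqform : List.map Prod.fst rest ++ [n] = (rest ++ [(n, path ++ [n])]).map Prod.fst := by
            simp
          rw [hqform]
          cases hs : scanB endIdx path ns (rest ++ [(n, path ++ [n])]) (PySem.List.pySetD visited n true) with
          | none =>
            rw [hs] at happly
            exact happly
          | some pr =>
            rw [hs] at happly
            obtain ⟨q', vis'⟩ := pr
            refine ⟨happly.1, happly.2.1, ?_⟩
            have := happly.2.2
            simp only [List.length_append, List.length_cons, List.length_nil] at this
            omega
        · refine ⟨?_, ?_, ?_, ?_, ?_, ?_, ?_⟩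
          · rw [PySem.List.length_pySetD]; exact hplen
          · rw [PySem.List.length_pySetD]; exact hvlen
          · intro i hi0 hi1
            rw [pyGetD_pySetD_nonneg parent n i current 0 hn0 hn1p hi0,
                pyGetD_pySetD_nonneg visited n i true true hn0 hn1v hi0]
            by_cases hin : i = n
            · simp [hin]; omega
            · rw [if_neg hin, if_neg hin]
              exact hvis i hi0 hi1
          · intro pr hpr
            rcases List.mem_append.mp hpr with h | h
            · exact hrange pr h
            · rcases List.mem_singleton.mp h with rfl
              exact ⟨hn0, hn1, hne⟩
          · intro pr hpr
            rcases List.mem_append.mp hpr with h | h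
            · obtain ⟨g, hgb, hrb⟩ := hpaths pr h
              exact ⟨g, by omega, rebuild?_mono parent _ start hkeep g pr.1 pr.2 hrb⟩
            · rcases List.mem_singleton.mp h with rfl
              refine ⟨gcur + 1, by omega, ?_⟩
              simp only [rebuild?, if_neg hnstart]
              rw [pyGetD_pySetD_nonneg parent n n current 0 hn0 hn1p hn0, if_pos rfl]
              rw [if_neg (by omega : ¬ current = -1), hrebuild']
              rfl
          · rw [pyGetD_pySetD_nonneg parent n start current 0 hn0 hn1p hst0,
                if_neg (fun h => hnstart h.symm)]
            exact hstart
          · rw [pyGetD_pySetD_nonneg parent n endIdx current 0 hn0 hn1p hend0,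
                if_neg (fun h => hne h.symm)]
            exact hendneg
      · rw [if_neg hb, if_neg (fun hf => hb (hcond.mpr hf))]
        exact ih (fun m hm => hns m (List.mem_cons_of_mem _ hm)) rest parent visited gcur
          ⟨hplen, hvlen, hvis, hrange, hpaths, hstart, hendneg⟩ hg hreb

-- the main lockstep lemma: A's loop followed by A's post-processing equals B's loop
lemma loop_equiv (graph : List (List Int)) (start endIdx : Int)
    (hrows : ∀ row ∈ graph, ∀ n ∈ row, 0 ≤ n ∧ n < (graph.length : Int))
    (hst0 : 0 ≤ start) (hend0 : 0 ≤ endIdx) (hse : endIdx ≠ start) :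
    ∀ (fuel : Nat) (qB : List (Int × List Int)) (parent : List Int) (visited : List Bool),
    BfsInv graph start endIdx qB parent visited →
    qB.length + cntNeg parent ≤ fuel →
    (if PySem.List.pyGetD (bfsLoopA graph endIdx fuel (qB.map Prod.fst) parent) endIdx 0 = -1 then ([] : List Int)
     else (reconA (bfsLoopA graph endIdx fuel (qB.map Prod.fst) parent) start (graph.length + 1) endIdx []).map graphIndexToLiteral)
    = bfsLoopB graph endIdx fuel qB visited := by
  intro fuel
  induction fuel with
  | zero =>
    intro qB parent visited hInv _
    rw [bfsLoopA_zero, bfsLoopB_zero, if_pos hInv.2.2.2.2.2.2]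
  | succ fuel ih =>
    intro qB parent visited hInv hle
    match qB with
    | [] =>
      rw [List.map_nil, bfsLoopA_nil, bfsLoopB_nil, if_pos hInv.2.2.2.2.2.2]
    | (current, path) :: rest =>
      obtain ⟨hplen, hvlen, hvis, hrange, hpaths, hstart, hendneg⟩ := hInv
      obtain ⟨hc0, hc1, hce⟩ := hrange (current, path) (List.mem_cons_self)
      obtain ⟨gcur, hgb, hrb⟩ := hpaths (current, path) (List.mem_cons_self)
      rw [List.map_cons, bfsLoopA_cons, bfsLoopB_cons, if_neg hce]
      have hns : ∀ n ∈ PySem.List.pyGetD graph current [], 0 ≤ n ∧ n < (graph.length : Int) := by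
        intro n hn
        have hrow : PySem.List.pyGetD graph current [] ∈ graph := by
          apply PySem.List.pyGetD_mem
          simp only [PySem.Raise.InRange]
          omega
        exact hrows _ hrow n hn
      have hscan := scan_equiv graph start endIdx current path hc0 hst0 hend0 hse
        (PySem.List.pyGetD graph current []) hns rest parent visited gcur
        ⟨hplen, hvlen, hvis, fun pr h => hrange pr (List.mem_cons_of_mem _ h),
          fun pr h => hpaths pr (List.mem_cons_of_mem _ h), hstart, hendneg⟩ hgb hrb
      simp only at hscan
      cases hs : scanB endIdx path (PySem.List.pyGetD graph current []) rest visited with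
      | none =>
        rw [hs] at hscan
        obtain ⟨hreb', hne', hgle⟩ := hscan
        have hkeeps := bfsLoopA_keeps graph endIdx fuel
          ((PySem.List.pyGetD graph current []).foldl
            (fun (st : List Int × List Int) neighbor =>
              if PySem.List.pyGetD st.2 neighbor 0 = -1 then
                (st.1 ++ [neighbor], PySem.List.pySetD st.2 neighbor current)
              else st) (rest.map Prod.fst, parent)).1
          ((PySem.List.pyGetD graph current []).foldl
            (fun (st : List Int × List Int) neighbor =>
              if PySem.List.pyGetD st.2 neighbor 0 = -1 then
                (st.1 ++ [neighbor], PySem.List.pySetD st.2 neighbor current)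
              else st) (rest.map Prod.fst, parent)).2
        rw [if_neg (by rw [hkeeps endIdx hne']; exact hne')]
        rw [recon_of_rebuild _ start (gcur + 1) endIdx (path ++ [endIdx])
          (rebuild?_mono _ _ start hkeeps (gcur + 1) endIdx _ hreb') (graph.length + 1) hgle []]
        simp
      | some pr =>
        rw [hs] at hscan
        obtain ⟨q', vis'⟩ := pr
        obtain ⟨hqeq, hInv', hcnt⟩ := hscan
        rw [hqeq]
        refine ih q' _ vis' hInv' ?_
        have hle' : rest.length + cntNeg parent ≤ fuel := by
          simp only [List.length_cons] at hle
          omega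
        exact le_trans hcnt hle'

lemma findPath_equiv (graph : List (List Int)) (start endIdx : Int)
    (hrows : ∀ row ∈ graph, ∀ n ∈ row, 0 ≤ n ∧ n < (graph.length : Int))
    (hst0 : 0 ≤ start) (hst1 : start < (graph.length : Int))
    (hend0 : 0 ≤ endIdx) (hend1 : endIdx < (graph.length : Int)) (hse : endIdx ≠ start) :
    findPathA graph start endIdx = findPathB graph start endIdx := by
  have hrep : ((List.replicate graph.length (-1 : Int)).length : Int) = (graph.length : Int) := by simp
  have hrepv : ((List.replicate graph.length false).length : Int) = (graph.length : Int) := by simp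
  have hst1p : start < ((List.replicate graph.length (-1 : Int)).length : Int) := by rw [hrep]; exact hst1
  have hst1v : start < ((List.replicate graph.length false).length : Int) := by rw [hrepv]; exact hst1
  have hrepget : ∀ i : Int, 0 ≤ i → i < (graph.length : Int) →
      PySem.List.pyGetD (List.replicate graph.length (-1 : Int)) i 0 = -1 := by
    intro i h0 h1
    rw [PySem.List.pyGetD_eq_getElem _ 0 h0 (by rw [hrep]; exact h1)]
    simp
  have hrepgetv : ∀ i : Int, 0 ≤ i → i < (graph.length : Int) →
      PySem.List.pyGetD (List.replicate graph.length false) i true = false := by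
    intro i h0 h1
    rw [PySem.List.pyGetD_eq_getElem _ true h0 (by rw [hrepv]; exact h1)]
    simp
  have hcnt0 : cntNeg (List.replicate graph.length (-1 : Int)) = graph.length := by
    unfold cntNeg
    induction graph.length with
    | zero => rfl
    | succ k ihk => simp [List.replicate_succ, ihk]
  have hcnt : cntNeg (PySem.List.pySetD (List.replicate graph.length (-1 : Int)) start start) + 1
      = graph.length := by
    rw [cntNeg_set _ start start hst0 hst1p (hrepget start hst0 hst1) (by omega), hcnt0]
  have hInv0 : BfsInv graph start endIdx [(start, [start])]
      (PySem.List.pySetD (List.replicate graph.length (-1 : Int)) start start)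
      (PySem.List.pySetD (List.replicate graph.length false) start true) := by
    refine ⟨?_, ?_, ?_, ?_, ?_, ?_, ?_⟩
    · rw [PySem.List.length_pySetD]; simp
    · rw [PySem.List.length_pySetD]; simp
    · intro i hi0 hi1
      rw [pyGetD_pySetD_nonneg _ start i start 0 hst0 hst1p hi0,
          pyGetD_pySetD_nonneg _ start i true true hst0 hst1v hi0]
      by_cases hi : i = start
      · rw [if_pos hi, if_pos hi]
        constructor
        · intro _; omega
        · intro _; rfl
      · rw [if_neg hi, if_neg hi, hrepgetv i hi0 hi1, hrepget i hi0 hi1]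
        simp
    · intro pr hpr
      rcases List.mem_singleton.mp hpr with rfl
      exact ⟨hst0, hst1, fun h => hse h.symm⟩
    · intro pr hpr
      rcases List.mem_singleton.mp hpr with rfl
      refine ⟨1, by omega, ?_⟩
      simp [rebuild?]
    · rw [pyGetD_pySetD_nonneg _ start start start 0 hst0 hst1p hst0, if_pos rfl]
    · rw [pyGetD_pySetD_nonneg _ start endIdx start 0 hst0 hst1p hend0, if_neg hse]
      exact hrepget endIdx hend0 hend1
  have := loop_equiv graph start endIdx hrows hst0 hend0 hse (graph.length + 1)
    [(start, [start])]
    (PySem.List.pySetD (List.replicate graph.length (-1 : Int)) start start)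
    (PySem.List.pySetD (List.replicate graph.length false) start true)
    hInv0 (by simp only [List.length_cons, List.length_nil]; omega)
  simpa only [findPathA, findPathB, List.map_cons, List.map_nil] using this

-- ===== the degenerate query for variable 0: both sides return [] =====

lemma pyIdx?_neg_one (n : Nat) (hn : 1 ≤ n) : PySem.List.pyIdx? n (-1) = some (n - 1) := by
  unfold PySem.List.pyIdx?
  rw [if_neg (by omega), if_pos (by omega)]
  simp

lemma pySetD_neg_one_replicate {α : Type} (n : Nat) (a : α) (hn : 1 ≤ n) :
    PySem.List.pySetD (List.replicate n a) (-1) a = List.replicate n a := by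
  unfold PySem.List.pySetD PySem.List.pySet?
  rw [List.length_replicate, pyIdx?_neg_one n hn]
  simp [List.set_replicate_self]

lemma findPathA_zero (graph : List (List Int)) (hlen : 1 ≤ graph.length) :
    findPathA graph (-1) (-1) = [] := by
  simp only [findPathA]
  rw [pySetD_neg_one_replicate _ _ hlen]
  have hloop : bfsLoopA graph (-1) (graph.length + 1) [-1] (List.replicate graph.length (-1 : Int))
      = List.replicate graph.length (-1 : Int) := by
    rw [bfsLoopA_cons, if_pos rfl]
  rw [hloop]
  rw [if_pos ?_]
  unfold PySem.List.pyGetD PySem.List.pyGet?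
  rw [List.length_replicate, pyIdx?_neg_one _ hlen]
  simp only [Option.bind_some]
  rw [List.getElem?_eq_getElem
    (show graph.length - 1 < (List.replicate graph.length (-1 : Int)).length by
      rw [List.length_replicate]; omega)]
  simp

lemma scanB_noend (graph : List (List Int)) (endIdx : Int) (path : List Int) (hend : endIdx < 0) :
    ∀ (ns : List Int), (∀ n ∈ ns, 0 ≤ n ∧ n < (graph.length : Int)) →
    ∀ (q : List (Int × List Int)) (vis : List Bool), vis.length = graph.length →
    (∀ pr ∈ q, -(graph.length : Int) ≤ pr.1 ∧ pr.1 < (graph.length : Int)) →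
    ∃ q' vis', scanB endIdx path ns q vis = some (q', vis') ∧ vis'.length = graph.length ∧
      (∀ pr ∈ q', -(graph.length : Int) ≤ pr.1 ∧ pr.1 < (graph.length : Int)) ∧
      q'.length + countFalse vis' ≤ q.length + countFalse vis := by
  intro ns
  induction ns with
  | nil =>
    intro _ q vis hvl hq
    exact ⟨q, vis, rfl, hvl, hq, le_refl _⟩
  | cons n ns ih =>
    intro hns q vis hvl hq
    obtain ⟨hn0, hn1⟩ := hns n (List.mem_cons_self)
    rw [scanB_cons, if_neg (by omega : ¬ n = endIdx)]
    by_cases hb : PySem.List.pyGetD vis n true = false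
    · rw [if_pos hb]
      obtain ⟨q', vis', hs, hvl', hq', hm⟩ := ih (fun m hm => hns m (List.mem_cons_of_mem _ hm))
        (q ++ [(n, path ++ [n])]) (PySem.List.pySetD vis n true)
        (by rw [PySem.List.length_pySetD]; exact hvl)
        (by
          intro pr hpr
          rcases List.mem_append.mp hpr with h | h
          · exact hq pr h
          · rcases List.mem_singleton.mp h with rfl
            constructor <;> omega)
      refine ⟨q', vis', hs, hvl', hq', ?_⟩
      have hcf : countFalse (PySem.List.pySetD vis n true) + 1 = countFalse vis :=
        cntFalse_set vis n hn0 (by rw [hvl]; exact hn1) hb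
      simp only [List.length_append, List.length_cons, List.length_nil] at hm
      omega
    · rw [if_neg hb]
      exact ih (fun m hm => hns m (List.mem_cons_of_mem _ hm)) q vis hvl hq

lemma loopB_nil (graph : List (List Int)) (endIdx : Int) (hend : endIdx < 0)
    (hrows : ∀ row ∈ graph, ∀ n ∈ row, 0 ≤ n ∧ n < (graph.length : Int)) :
    ∀ (fuel : Nat) (qB : List (Int × List Int)) (visited : List Bool),
    visited.length = graph.length →
    (∀ pr ∈ qB, -(graph.length : Int) ≤ pr.1 ∧ pr.1 < (graph.length : Int)) →
    bfsLoopB graph endIdx fuel qB visited = [] := by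
  intro fuel
  induction fuel with
  | zero => intro qB visited _ _; rfl
  | succ fuel ih =>
    intro qB visited hvl hq
    match qB with
    | [] => rfl
    | (current, path) :: rest =>
      obtain ⟨hc0, hc1⟩ := hq (current, path) (List.mem_cons_self)
      have hns : ∀ n ∈ PySem.List.pyGetD graph current [], 0 ≤ n ∧ n < (graph.length : Int) := by
        intro n hn
        have hrow : PySem.List.pyGetD graph current [] ∈ graph := by
          apply PySem.List.pyGetD_mem
          simp only [PySem.Raise.InRange]
          omega
        exact hrows _ hrow n hn
      obtain ⟨q', vis', hs, hvl', hq', _⟩ := scanB_noend graph endIdx path hend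
        (PySem.List.pyGetD graph current []) hns rest visited hvl
        (fun pr h => hq pr (List.mem_cons_of_mem _ h))
      rw [bfsLoopB_cons, hs]
      exact ih q' vis' hvl' hq'

lemma findPathB_zero (graph : List (List Int)) (hlen : 1 ≤ graph.length)
    (hrows : ∀ row ∈ graph, ∀ n ∈ row, 0 ≤ n ∧ n < (graph.length : Int)) :
    findPathB graph (-1) (-1) = [] := by
  unfold findPathB
  apply loopB_nil graph (-1) (by omega) hrows
  · rw [PySem.List.length_pySetD]; simp
  · intro pr hpr
    rcases List.mem_singleton.mp hpr with rfl
    constructor <;> omega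

lemma litIdx_range (v : Int) (L : Int) (h1 : 1 ≤ |v|) (h2 : 2 * |v| ≤ L) :
    0 ≤ literalToGraphIndex v ∧ literalToGraphIndex v < L := by
  unfold literalToGraphIndex
  rcases abs_cases v with ⟨ha, _⟩ | ⟨ha, _⟩ <;> split_ifs <;> simp only <;> omega

lemma litIdx_ne (v : Int) (hv : v ≠ 0) : literalToGraphIndex (-v) ≠ literalToGraphIndex v := by
  unfold literalToGraphIndex
  rcases abs_cases v with ⟨ha, _⟩ | ⟨ha, _⟩ <;>
    rcases abs_cases (-v) with ⟨hb, _⟩ | ⟨hb, _⟩ <;> split_ifs <;> simp only <;> omega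

lemma outer_equiv (graph : List (List Int)) (vars : List Int)
    (hPre : Pre_find_incremental_conflict_cycle graph vars) :
    find_incremental_conflict_cycle graph vars = find_incremental_conflict_cycle_alt graph vars := by
  induction vars with
  | nil => rfl
  | cons v rest ih =>
    obtain ⟨hv, hrows'⟩ := hPre
    have hrows : ∀ row ∈ graph, ∀ n ∈ row, 0 ≤ n ∧ n < (graph.length : Int) :=
      hrows'.resolve_left (by simp)
    have ihr := ih ⟨fun w hw => hv w (List.mem_cons_of_mem _ hw), Or.inr hrows⟩
    simp only [find_incremental_conflict_cycle, find_incremental_conflict_cycle_alt]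
    rcases hv v (List.mem_cons_self) with ⟨hv0, hlen⟩ | ⟨hv1, hv2⟩
    · subst hv0
      have hl : literalToGraphIndex 0 = -1 := by decide
      have hl' : literalToGraphIndex (-(0 : Int)) = -1 := by decide
      rw [hl, hl', findPathA_zero graph (by omega), findPathB_zero graph (by omega) hrows]
      simp [ihr]
    · have hvne : v ≠ 0 := by
        intro h
        rw [h] at hv1
        simp at hv1
      have hvm : 1 ≤ |(-v)| ∧ 2 * |(-v)| ≤ (graph.length : Int) := by
        rw [abs_neg]; exact ⟨hv1, hv2⟩
      obtain ⟨hp0, hp1⟩ := litIdx_range v (graph.length : Int) hv1 hv2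
      obtain ⟨hn0, hn1⟩ := litIdx_range (-v) (graph.length : Int) hvm.1 hvm.2
      have h1 := findPath_equiv graph (literalToGraphIndex v) (literalToGraphIndex (-v))
        hrows hp0 hp1 hn0 hn1 (litIdx_ne v hvne)
      have h2 := findPath_equiv graph (literalToGraphIndex (-v)) (literalToGraphIndex v)
        hrows hn0 hn1 hp0 hp1 (by exact fun h => litIdx_ne v hvne h.symm)
      rw [h1, h2, ihr]

-- ===== VERDICT (by name: the statement is the Claim_ definition above) =====
theorem find_incremental_conflict_cycle_spec : Claim_equal_find_incremental_conflict_cycle := by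
  intro graph variables_to_check _ hPre
  unfold Spec_find_incremental_conflict_cycle
  exact outer_equiv graph variables_to_check hPre
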